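-- pv_equiv track=rewrite | github.com/Symbolitos/retos-programacion-2023 | Retos/Reto #31 - EL ÁBACO [Fácil]/Symbolitos.py | abaco_counter
-- ===== SOURCE A (Python) =====
-- def abaco_counter(text):
--
--     abaco = {"0": "---OOOOOOOOO\n", "1": "O---OOOOOOOO\n", "2": "OO---OOOOOOO\n", "3": "OOO---OOOOOO\n",
--             "4": "OOOO---OOOOO\n", "5": "OOOOO---OOOO\n", "6": "OOOOOO---OOO\n", "7": "OOOOOOO---OO\n",
--             "8": "OOOOOOOO---O\n", "9": "OOOOOOOOO---\n"}
--
--     abaco_text = ""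
--
--     for word in text:
--         if word.upper() in abaco.keys():
--             abaco_text += abaco[word.upper()]
--         else:
--             abaco_text += word
--
--     return abaco_text
-- ===== SOURCE B (Python) =====
-- def _row(c):
--     if "0" <= c <= "9":
--         d = ord(c) - 48
--         return "O" * d + "---" + "O" * (9 - d) + "\n"
--     return c
--
--
-- def abaco_counter(text):
--     return "".join(map(_row, text))
-- ===== Notes on version B (the rewrite author's own statement) =====
-- stated objective: simpler
-- what changed: Replaces the hardcoded ten-entry dict lookup (with upper() on each character) and the quadratic string-concatenation accumulator by a closed-form per-character row formula applied with map and a single join.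
import Mathlib
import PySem

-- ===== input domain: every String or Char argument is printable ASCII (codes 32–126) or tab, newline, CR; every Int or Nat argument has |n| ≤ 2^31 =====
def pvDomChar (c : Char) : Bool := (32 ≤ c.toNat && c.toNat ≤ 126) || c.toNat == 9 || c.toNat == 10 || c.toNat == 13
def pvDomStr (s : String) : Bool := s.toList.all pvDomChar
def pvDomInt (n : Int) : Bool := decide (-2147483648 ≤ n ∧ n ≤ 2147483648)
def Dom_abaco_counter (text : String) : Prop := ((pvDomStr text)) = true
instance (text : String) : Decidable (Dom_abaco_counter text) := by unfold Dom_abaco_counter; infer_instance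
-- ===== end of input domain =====

-- B replaces A's hardcoded ten-entry dict and += accumulator by a per-character closed-form row formula mapped and joined once (objective: simpler).


-- ===== PORT A =====
def abacoDict : PySem.Dict (List Char) (List Char) :=
  PySem.Dict.ofList
    [ (['0'], "---OOOOOOOOO\n".toList), (['1'], "O---OOOOOOOO\n".toList),
      (['2'], "OO---OOOOOOO\n".toList), (['3'], "OOO---OOOOOO\n".toList),
      (['4'], "OOOO---OOOOO\n".toList), (['5'], "OOOOO---OOOO\n".toList),
      (['6'], "OOOOOO---OOO\n".toList), (['7'], "OOOOOOO---OO\n".toList),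
      (['8'], "OOOOOOOO---O\n".toList), (['9'], "OOOOOOOOO---\n".toList) ]

-- one iteration of A's loop body: key = word.upper(); if key in abaco: acc += abaco[key] else acc += word
def abacoStepA (acc : List Char) (c : Char) : List Char :=
  if PySem.Dict.contains abacoDict (PySem.Chars.upper [c]) then
    acc ++ PySem.Dict.getD abacoDict (PySem.Chars.upper [c]) []
  else acc ++ [c]

def abaco_counter (text : String) : String :=
  String.ofList (text.toList.foldl abacoStepA [])

-- ===== PORT B =====
def abacoRow (c : Char) : List Char :=
  if '0' ≤ c ∧ c ≤ '9' then
    let d := c.toNat - 48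
    List.replicate d 'O' ++ "---".toList ++ List.replicate (9 - d) 'O' ++ "\n".toList
  else [c]

def abaco_counter_alt (text : String) : String :=
  String.ofList ((text.toList.map abacoRow).flatten)

-- ===== PRECONDITION & SPEC =====
def Spec_abaco_counter (text : String) (out : String) : Prop := out = abaco_counter_alt text
instance (text : String) (out : String) : Decidable (Spec_abaco_counter text out) := by unfold Spec_abaco_counter; infer_instance

-- ===== CLAIM (what is proved, stated in full; the proofs are below) =====
def Claim_equal_abaco_counter : Prop := ∀ (text : String), Dom_abaco_counter text → Spec_abaco_counter text (abaco_counter text)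

-- ===== LEMMAS AND PROOFS =====

set_option maxRecDepth 8192 in
set_option maxHeartbeats 1000000 in
-- per-character agreement, verified by evaluation over all domain characters (codes < 128)
theorem abacoStep_eq_row (n : Nat) (h : n < 128) :
    abacoStepA [] (Char.ofNat n) = abacoRow (Char.ofNat n) := by
  revert h; revert n; decide

theorem abacoStepA_acc (acc : List Char) (c : Char) :
    abacoStepA acc c = acc ++ abacoStepA [] c := by
  unfold abacoStepA
  split_ifs <;> simp

theorem abaco_foldl_eq (l : List Char) (hl : l.all pvDomChar = true) (acc : List Char) :
    l.foldl abacoStepA acc = acc ++ (l.map abacoRow).flatten := by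
  induction l generalizing acc with
  | nil => simp
  | cons c t ih =>
    simp only [List.all_cons, Bool.and_eq_true] at hl
    have hc : c.toNat < 128 := by
      simp only [pvDomChar, Bool.or_eq_true, Bool.and_eq_true, decide_eq_true_eq,
        beq_iff_eq] at hl
      omega
    have hcc : Char.ofNat c.toNat = c := Char.ofNat_toNat c
    have hstep : abacoStepA acc c = acc ++ abacoRow c := by
      rw [abacoStepA_acc, ← hcc, abacoStep_eq_row c.toNat hc]
    simp only [List.foldl_cons, hstep, ih hl.2, List.map_cons, List.flatten_cons,
      List.append_assoc]

-- ===== VERDICT (by name: the statement is the Claim_ definition above) =====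
theorem abaco_counter_spec : Claim_equal_abaco_counter := by
  intro text hdom
  unfold Spec_abaco_counter abaco_counter abaco_counter_alt
  rw [abaco_foldl_eq text.toList hdom []]
  simp
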